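-- pv_equiv track=rewrite | github.com/filipewt/RPG_DM_Agent | dice_roller.py | _count_successes
-- ===== SOURCE A (Python) =====
-- def _count_successes(rolls: list[int]) -> int:
--     """Count successes in dice rolls (6+ = 1 success, 10 = 2 successes)."""
--     successes = 0
--     for roll in rolls:
--         if roll >= 6:
--             successes += 1
--         if roll == 10:
--             successes += 1  # 10s are worth 2 successes
--     return successes
-- ===== SOURCE B (Python) =====
-- def _count_successes(rolls: list[int]) -> int:
--     """Count successes in dice rolls (6+ = 1 success, 10 = 2 successes)."""
--     freq = {}
--     for r in rolls:
--         freq[r] = freq.get(r, 0) + 1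
--     return sum(((1 if v >= 6 else 0) + (1 if v == 10 else 0)) * c
--                for v, c in freq.items())
-- ===== Notes on version B (the rewrite author's own statement) =====
-- stated objective: alternative
-- what changed: B first tabulates the rolls into a frequency dict {value: count} and then computes the weighted sum over the distinct values ((v>=6)+(v==10))*count, instead of A's per-roll conditional accumulation.
import Mathlib
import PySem

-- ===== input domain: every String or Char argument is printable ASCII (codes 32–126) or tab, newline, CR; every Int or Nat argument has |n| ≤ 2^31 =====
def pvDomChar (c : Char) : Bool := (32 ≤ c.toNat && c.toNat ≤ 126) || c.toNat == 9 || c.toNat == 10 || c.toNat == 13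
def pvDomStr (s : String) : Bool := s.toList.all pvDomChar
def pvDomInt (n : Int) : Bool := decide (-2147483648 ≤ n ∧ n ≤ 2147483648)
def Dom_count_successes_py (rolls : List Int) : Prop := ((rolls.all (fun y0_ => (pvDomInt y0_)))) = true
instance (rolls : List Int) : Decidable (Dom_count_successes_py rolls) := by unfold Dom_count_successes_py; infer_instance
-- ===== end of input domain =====

-- B tabulates the rolls into a frequency dict first, then takes a weighted sum
-- over the distinct values; A scans per roll. Same cost, different decomposition.

-- ===== PORT A =====
def count_successes_py (rolls : List Int) : Int :=
  rolls.foldl (fun successes roll =>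
    let successes := if roll ≥ 6 then successes + 1 else successes
    if roll = 10 then successes + 1 else successes) 0

-- ===== PORT B =====
def count_successes_py_alt (rolls : List Int) : Int :=
  let freq := rolls.foldl (fun d r => d.insert r (d.getD r 0 + 1)) PySem.Dict.empty
  (freq.items.map (fun p =>
    ((if p.1 ≥ 6 then (1 : Int) else 0) + (if p.1 = 10 then 1 else 0)) * p.2)).sum

-- ===== PRECONDITION & SPEC =====
def Spec_count_successes_py (rolls : List Int) (out : Int) : Prop := out = count_successes_py_alt rolls
instance (rolls : List Int) (out : Int) : Decidable (Spec_count_successes_py rolls out) := by unfold Spec_count_successes_py; infer_instance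

-- ===== CLAIM (what is proved, stated in full; the proofs are below) =====
def Claim_equal_count_successes_py : Prop := ∀ (rolls : List Int), Dom_count_successes_py rolls → Spec_count_successes_py rolls (count_successes_py rolls)

-- ===== LEMMAS AND PROOFS =====

def pvW (r : Int) : Int := (if r ≥ 6 then (1 : Int) else 0) + (if r = 10 then 1 else 0)

theorem pvA_foldl (rolls : List Int) : ∀ s : Int,
    rolls.foldl (fun successes roll =>
      let successes := if roll ≥ 6 then successes + 1 else successes
      if roll = 10 then successes + 1 else successes) s
      = s + (rolls.map pvW).sum := by
  induction rolls with
  | nil => intro s; simp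
  | cons x t ih =>
    intro s
    simp only [List.foldl_cons, List.map_cons, List.sum_cons, ih, pvW]
    split_ifs <;> ring

theorem pv_sum_single {L : List Int} (hnd : L.Nodup) {x : Int} (hx : x ∈ L) (c : Int) :
    (L.map (fun k => if k = x then c else 0)).sum = c := by
  induction L with
  | nil => cases hx
  | cons y t ih =>
    simp only [List.map_cons, List.sum_cons]
    rcases List.mem_cons.mp hx with h | h
    · have hz : ∀ k ∈ t, (if k = x then c else 0) = 0 := by
        intro k hk
        have : k ≠ x := fun he => (List.nodup_cons.mp hnd).1 ((he.trans h).symm ▸ hk)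
        simp [this]
      rw [if_pos h.symm, List.sum_eq_zero]
      · ring
      · intro z hzz
        rcases List.mem_map.mp hzz with ⟨k, hk, rfl⟩
        exact hz k hk
    · have hy : y ≠ x := fun he => (List.nodup_cons.mp hnd).1 (he ▸ h)
      rw [if_neg hy, ih (List.nodup_cons.mp hnd).2 h]
      ring

theorem pv_weighted (xs : List Int) {L : List Int} (hnd : L.Nodup)
    (hsub : ∀ y ∈ xs, y ∈ L) :
    (L.map (fun k => pvW k * (xs.count k : Int))).sum = (xs.map pvW).sum := by
  induction xs with
  | nil => simp
  | cons x t ih =>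
    have step : (L.map (fun k => pvW k * ((x :: t).count k : Int))).sum
        = (L.map (fun k => pvW k * (t.count k : Int))).sum
          + (L.map (fun k => if k = x then pvW x else 0)).sum := by
      rw [← List.sum_map_add]
      apply congrArg
      apply List.map_congr_left
      intro k _
      by_cases hk : k = x
      · subst hk; simp [List.count_cons_self]; push_cast; ring
      · simp [List.count_cons, hk]
        exact Or.inl fun he => hk he.symm
    rw [step, ih (fun y hy => hsub y (List.mem_cons_of_mem x hy)),
        pv_sum_single hnd (hsub x (List.mem_cons_self)) (pvW x)]
    simp only [List.map_cons, List.sum_cons]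
    ring

-- ===== VERDICT (by name: the statement is the Claim_ definition above) =====
theorem count_successes_py_spec : Claim_equal_count_successes_py := by
  intro rolls _
  unfold Spec_count_successes_py count_successes_py count_successes_py_alt
  rw [pvA_foldl rolls 0, PySem.Dict.foldl_insert_getD_add_one_eq_counter]
  simp only [PySem.Dict.items_counter, List.map_map]
  have := pv_weighted rolls (L := PySem.Set.ofList rolls)
    (PySem.Set.nodup_ofList rolls) (fun y hy => (PySem.Set.mem_ofList rolls y).mpr hy)
  simp only [Function.comp_def, pvW] at this ⊢
  rw [this]
  ring
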